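-- pv_equiv track=rewrite | github.com/manuel-48052/CDRM | TP2_1_2/ex_1e2.py | decodify_string_to_itns_3_1
-- ===== SOURCE A (Python) =====
-- def decodify_string_to_itns_3_1(input):
--     i = 0
--     output = []
--     while i < len(input):
--         part = input[i:i+3]
--         n = 0
--         for numb in part:
--             n += numb
--         if n < 2:
--             output.append(0)
--         else:
--             output.append(1)
--         i = i + 3
--     return output
-- ===== SOURCE B (Python) =====
-- def decodify_string_to_itns_3_1(input):
--     output = []
--     n = 0
--     c = 0
--     for x in input:
--         n += x
--         c += 1
--         if c == 3:
--             output.append(0 if n < 2 else 1)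
--             n = 0
--             c = 0
--     if c > 0:
--         output.append(0 if n < 2 else 1)
--     return output
-- ===== Notes on version B (the rewrite author's own statement) =====
-- stated objective: simpler
-- what changed: Replaced the index-and-slice chunking loop with inner summation pass by a single flat scan keeping a running sum and a count, flushing every third element and once at the end for a partial group.
import Mathlib
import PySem

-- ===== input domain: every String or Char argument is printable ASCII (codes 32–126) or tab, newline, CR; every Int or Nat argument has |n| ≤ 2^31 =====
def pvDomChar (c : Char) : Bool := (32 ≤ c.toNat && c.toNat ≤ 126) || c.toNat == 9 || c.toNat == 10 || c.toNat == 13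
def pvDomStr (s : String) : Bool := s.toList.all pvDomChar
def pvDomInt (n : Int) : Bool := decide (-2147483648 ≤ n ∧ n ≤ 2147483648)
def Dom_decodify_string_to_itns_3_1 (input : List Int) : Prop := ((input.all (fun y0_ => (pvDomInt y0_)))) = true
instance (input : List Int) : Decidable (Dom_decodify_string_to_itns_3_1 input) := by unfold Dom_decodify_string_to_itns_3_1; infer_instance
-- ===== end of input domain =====

-- B replaces A's index-and-slice chunking (with an inner summing loop) by one flat
-- scan with a running sum and counter, flushed every third element and at the end (objective: simpler).

-- ===== PORT A =====
-- while-loop of A: index i, slice input[i:i+3], inner for-loop summing the part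
def pvALoop (input : List Int) (i : Nat) (output : List Int) : List Int :=
  if _h : i < input.length then
    let part := PySem.List.slice input (some (i : Int)) (some ((i : Int) + 3))
    let n := part.foldl (fun a b => a + b) 0
    pvALoop input (i + 3) (output ++ [if n < 2 then 0 else 1])
  else output
termination_by input.length - i

def decodify_string_to_itns_3_1 (input : List Int) : List Int :=
  pvALoop input 0 []

-- ===== PORT B =====
-- flat scan of B: running sum n, counter c, flush at c = 3 and at the end if c > 0
def pvBLoop (l : List Int) (n : Int) (c : Nat) (output : List Int) : List Int :=
  match l with
  | [] => if c > 0 then output ++ [if n < 2 then 0 else 1] else output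
  | x :: xs =>
    if c + 1 = 3 then pvBLoop xs 0 0 (output ++ [if n + x < 2 then 0 else 1])
    else pvBLoop xs (n + x) (c + 1) output

def decodify_string_to_itns_3_1_alt (input : List Int) : List Int :=
  pvBLoop input 0 0 []

-- ===== PRECONDITION & SPEC =====
def Spec_decodify_string_to_itns_3_1 (input : List Int) (out : List Int) : Prop := out = decodify_string_to_itns_3_1_alt input
instance (input : List Int) (out : List Int) : Decidable (Spec_decodify_string_to_itns_3_1 input out) := by unfold Spec_decodify_string_to_itns_3_1; infer_instance

-- ===== CLAIM (what is proved, stated in full; the proofs are below) =====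
def Claim_equal_decodify_string_to_itns_3_1 : Prop := ∀ (input : List Int), Dom_decodify_string_to_itns_3_1 input → Spec_decodify_string_to_itns_3_1 input (decodify_string_to_itns_3_1 input)

-- ===== LEMMAS AND PROOFS =====

-- A's loop only looks at input.drop i: list-structural reformulation
def pvAList : List Int → List Int → List Int
  | [], output => output
  | x :: xs, output =>
    pvAList (xs.drop 2)
      (output ++ [if ((x :: xs).take 3).foldl (fun a b => a + b) 0 < 2 then 0 else 1])
termination_by l _ => l.length
decreasing_by simp [List.length_drop]

theorem pvAList_nil (output : List Int) : pvAList [] output = output := by simp [pvAList]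

theorem pvAList_cons (x : Int) (xs output : List Int) :
    pvAList (x :: xs) output
      = pvAList (xs.drop 2)
          (output ++ [if ((x :: xs).take 3).foldl (fun a b => a + b) 0 < 2 then 0 else 1]) := by
  conv_lhs => rw [pvAList.eq_def]

theorem pvALoop_eq_pvAList (input : List Int) (i : Nat) (output : List Int) :
    pvALoop input i output = pvAList (input.drop i) output := by
  by_cases h : i < input.length
  · rw [pvALoop]
    simp only [h, dif_pos]
    have hs : PySem.List.slice input (some (i : Int)) (some ((i : Int) + 3))
        = (input.drop i).take 3 := by
      have := PySem.List.slice_natCast_add input i 3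
      simpa using this
    have hd : input.drop (i + 3) = (input.drop i).drop 3 := by
      simp [List.drop_drop]
    have hne : input.drop i ≠ [] := by
      simp [List.drop_eq_nil_iff]; omega
    rw [pvALoop_eq_pvAList input (i + 3), hs, hd]
    cases hdi : input.drop i with
    | nil => exact absurd hdi hne
    | cons a as => rw [pvAList_cons]; simp
  · rw [pvALoop]
    simp only [h, dif_neg, not_false_iff]
    have : input.drop i = [] := List.drop_eq_nil_of_le (by omega)
    rw [this, pvAList_nil]
termination_by input.length - i
decreasing_by omega

theorem pvBLoop_eq_pvAList : ∀ k (l : List Int), l.length ≤ k → ∀ output,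
    pvBLoop l 0 0 output = pvAList l output := by
  intro k
  induction k with
  | zero =>
    intro l hl output
    have : l = [] := List.eq_nil_of_length_eq_zero (by omega)
    subst this
    simp [pvBLoop, pvAList_nil]
  | succ k ih =>
    intro l hl output
    match l with
    | [] => simp [pvBLoop, pvAList_nil]
    | [x] =>
      rw [pvAList_cons]
      simp [pvBLoop, pvAList_nil]
    | [x, y] =>
      rw [pvAList_cons]
      simp [pvBLoop, pvAList_nil]
    | x :: y :: z :: rest =>
      rw [pvBLoop]; simp only [if_neg (by omega : ¬ (0 + 1 = 3))]
      rw [pvBLoop]; simp only [if_neg (by omega : ¬ (1 + 1 = 3))]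
      rw [pvBLoop]; simp only [if_pos (by norm_num : (2:Nat) + 1 = 3)]
      rw [ih rest (by simp at hl ⊢; omega)]
      rw [pvAList_cons]
      simp

-- ===== VERDICT (by name: the statement is the Claim_ definition above) =====
theorem decodify_string_to_itns_3_1_spec : Claim_equal_decodify_string_to_itns_3_1 := by
  intro input _
  show decodify_string_to_itns_3_1 input = decodify_string_to_itns_3_1_alt input
  unfold decodify_string_to_itns_3_1 decodify_string_to_itns_3_1_alt
  rw [pvALoop_eq_pvAList, List.drop_zero, pvBLoop_eq_pvAList input.length input le_rfl]
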